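-- pv_equiv track=rewrite | github.com/GavinGuan95/Punctuator.Pytorch | data/ted_transcript.py | _get_index_mapping
-- ===== SOURCE A (Python) =====
-- def _get_index_mapping(alignment_string):
--     dash_index = []
--     original_index = 0
--     clean_to_alignment = {}
--     alignment_to_clean = {}
--     for i, x in enumerate(alignment_string):
--         if x == "-":
--             dash_index.append(i)
--         else:
--             clean_to_alignment[original_index] = i
--             alignment_to_clean[i] = original_index
--             original_index += 1
--
--     return clean_to_alignment, alignment_to_clean
-- ===== SOURCE B (Python) =====
-- def _get_index_mapping(alignment_string):
--     # Pass 1: prefix-sum scan of dash counts (dashes_before[i] = number of '-' among the first i chars).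
--     dashes_before = []
--     d = 0
--     for ch in alignment_string:
--         dashes_before.append(d)
--         d += (ch == "-")
--     # Pass 2: the clean index of a kept position i is derived arithmetically as i - dashes_before[i].
--     alignment_to_clean = {i: i - nd for (i, ch), nd in zip(enumerate(alignment_string), dashes_before) if ch != "-"}
--     # Pass 3: invert (keys already in increasing clean order).
--     clean_to_alignment = {c: a for a, c in alignment_to_clean.items()}
--     return clean_to_alignment, alignment_to_clean
-- ===== Notes on version B (the rewrite author's own statement) =====
-- stated objective: alternative
-- what changed: Replaces A's fused loop that builds both dicts with a manually incremented clean-index counter (and an unused dash list) by a prefix-sum scan of dash counts followed by an arithmetic dict comprehension (clean index = i - dashes_before[i]) and an inversion pass.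
import Mathlib
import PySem

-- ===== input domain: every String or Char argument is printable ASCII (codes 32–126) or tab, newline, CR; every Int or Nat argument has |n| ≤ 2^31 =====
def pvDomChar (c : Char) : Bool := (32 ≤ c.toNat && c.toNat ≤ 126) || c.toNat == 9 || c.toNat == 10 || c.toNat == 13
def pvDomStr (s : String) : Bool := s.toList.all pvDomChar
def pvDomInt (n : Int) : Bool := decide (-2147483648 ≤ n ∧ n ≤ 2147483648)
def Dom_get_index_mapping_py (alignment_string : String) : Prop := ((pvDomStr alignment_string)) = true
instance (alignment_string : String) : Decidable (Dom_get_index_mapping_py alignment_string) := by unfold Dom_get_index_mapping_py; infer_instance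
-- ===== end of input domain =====

-- B replaces A's fused dict-building loop (manual clean-index counter, unused dash list) by a
-- prefix-sum scan of dash counts: the clean index of a kept position i is derived arithmetically
-- as i - dashes_before[i], then the second dict is an inversion pass; objective: alternative, same cost.

-- ===== PORT A =====
-- loop body of A's single for-loop: state = (dash_index, original_index, clean_to_alignment, alignment_to_clean)
def pvStepA (st : List Int × Int × PySem.Dict Int Int × PySem.Dict Int Int) (ix : Int × Char) :
    List Int × Int × PySem.Dict Int Int × PySem.Dict Int Int :=
  if ix.2 == '-' then (st.1 ++ [ix.1], st.2.1, st.2.2.1, st.2.2.2)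
  else (st.1, st.2.1 + 1, st.2.2.1.insert st.2.1 ix.1, st.2.2.2.insert ix.1 st.2.1)

def get_index_mapping_py (alignment_string : String) : (List (Int × Int)) × (List (Int × Int)) :=
  let st := (PySem.List.enumerate alignment_string.toList).foldl pvStepA
    ([], 0, PySem.Dict.empty, PySem.Dict.empty)
  (st.2.2.1.items, st.2.2.2.items)

-- ===== PORT B =====
def get_index_mapping_py_alt (alignment_string : String) : (List (Int × Int)) × (List (Int × Int)) :=
  -- pass 1: prefix-sum scan of dash counts
  let dashes_before := (alignment_string.toList.foldl
      (fun st ch => (st.1 ++ [st.2], st.2 + (if ch == '-' then (1 : Int) else 0)))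
      (([] : List Int), (0 : Int))).1
  -- pass 2: dict comprehension over zip(enumerate(s), dashes_before), clean index = i - nd
  let a2c := (((PySem.List.enumerate alignment_string.toList).zip dashes_before).filter
      (fun p => p.1.2 != '-')).foldl
      (fun dct p => dct.insert p.1.1 (p.1.1 - p.2)) PySem.Dict.empty
  -- pass 3: inversion dict comprehension
  let c2a := a2c.items.foldl (fun dct kv => dct.insert kv.2 kv.1) PySem.Dict.empty
  (c2a.items, a2c.items)

-- ===== PRECONDITION & SPEC =====
def Spec_get_index_mapping_py (alignment_string : String) (out : (List (Int × Int)) × (List (Int × Int))) : Prop := out = get_index_mapping_py_alt alignment_string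
instance (alignment_string : String) (out : (List (Int × Int)) × (List (Int × Int))) : Decidable (Spec_get_index_mapping_py alignment_string out) := by unfold Spec_get_index_mapping_py; infer_instance

-- ===== CLAIM (what is proved, stated in full; the proofs are below) =====
def Claim_equal_get_index_mapping_py : Prop := ∀ (alignment_string : String), Dom_get_index_mapping_py alignment_string → Spec_get_index_mapping_py alignment_string (get_index_mapping_py alignment_string)

-- ===== LEMMAS AND PROOFS =====

-- A's fold produces: c2a.items = enumerate P oi, a2c.items = swapped, where P = kept positions
theorem pvFoldA_spec (l : List (Int × Char)) :
    ∀ (dash : List Int) (oi : Int) (c2a a2c : PySem.Dict Int Int),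
    (∀ k ∈ c2a.keys, k < oi) → (∀ k ∈ a2c.keys, ∀ p ∈ l, k < p.1) →
    l.Pairwise (fun p q => p.1 < q.1) →
    ((l.foldl pvStepA (dash, oi, c2a, a2c)).2.2.1.items
        = c2a.items ++ PySem.List.enumerate ((l.filter (fun p => p.2 != '-')).map (·.1)) oi)
    ∧ ((l.foldl pvStepA (dash, oi, c2a, a2c)).2.2.2.items
        = a2c.items ++ (PySem.List.enumerate ((l.filter (fun p => p.2 != '-')).map (·.1)) oi).map (fun p => (p.2, p.1))) := by
  induction l with
  | nil =>
    intro dash oi c2a a2c hc ha hp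
    simp [PySem.List.enumerate_nil]
  | cons p rest ih =>
    intro dash oi c2a a2c hc ha hp
    have hp' := (List.pairwise_cons.mp hp).2
    have hphead := (List.pairwise_cons.mp hp).1
    by_cases hd : p.2 = '-'
    · have hstep : pvStepA (dash, oi, c2a, a2c) p = (dash ++ [p.1], oi, c2a, a2c) := by
        simp [pvStepA, hd]
      have := ih (dash ++ [p.1]) oi c2a a2c hc
        (fun k hk q hq => ha k hk q (List.mem_cons_of_mem _ hq)) hp'
      simpa [hstep, List.filter_cons, hd] using this
    · have hnc : c2a.contains oi = false := by
        simp only [Bool.eq_false_iff, ne_eq, PySem.Dict.contains_iff_mem_keys]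
        intro hmem; exact absurd (hc oi hmem) (lt_irrefl oi)
      have hna : a2c.contains p.1 = false := by
        simp only [Bool.eq_false_iff, ne_eq, PySem.Dict.contains_iff_mem_keys]
        intro hmem
        exact absurd (ha p.1 hmem p (List.mem_cons_self)) (lt_irrefl p.1)
      have hstep : pvStepA (dash, oi, c2a, a2c) p
          = (dash, oi + 1, c2a.insert oi p.1, a2c.insert p.1 oi) := by
        simp [pvStepA, hd]
      have hc' : ∀ k ∈ (c2a.insert oi p.1).keys, k < oi + 1 := by
        intro k hk
        rw [PySem.Dict.mem_keys_insert] at hk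
        rcases hk with h | h
        · omega
        · exact lt_trans (hc k h) (by omega)
      have ha' : ∀ k ∈ (a2c.insert p.1 oi).keys, ∀ q ∈ rest, k < q.1 := by
        intro k hk q hq
        rw [PySem.Dict.mem_keys_insert] at hk
        rcases hk with h | h
        · exact h ▸ hphead q hq
        · exact ha k h q (List.mem_cons_of_mem _ hq)
      have := ih dash (oi + 1) (c2a.insert oi p.1) (a2c.insert p.1 oi) hc' ha' hp'
      rw [List.foldl_cons, hstep]
      refine ⟨?_, ?_⟩
      · rw [this.1, PySem.Dict.items_insert_of_not_contains (h := hnc)]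
        simp [hd, PySem.List.enumerate_cons]
      · rw [this.2, PySem.Dict.items_insert_of_not_contains (h := hna)]
        simp [hd, PySem.List.enumerate_cons]

-- recursive characterisation of B's prefix-sum scan
def pvDB : List Char → Int → List Int
  | [], _ => []
  | c :: cs, d => d :: pvDB cs (d + (if c == '-' then 1 else 0))

theorem pvScan_spec (l : List Char) : ∀ (acc : List Int) (d : Int),
    (l.foldl (fun st ch => (st.1 ++ [st.2], st.2 + (if ch == '-' then (1 : Int) else 0))) (acc, d)).1
      = acc ++ pvDB l d := by
  induction l with
  | nil => intro acc d; simp [pvDB]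
  | cons c cs ih =>
    intro acc d
    simp only [List.foldl_cons, pvDB]
    rw [ih]
    simp

-- the zipped, filtered, mapped pair list equals the swapped enumeration of kept positions
theorem pvZip_spec (l : List Char) : ∀ (i d : Int),
    ((((PySem.List.enumerate l i).zip (pvDB l d)).filter (fun p => p.1.2 != '-')).map
        (fun p => (p.1.1, p.1.1 - p.2)))
      = (PySem.List.enumerate (((PySem.List.enumerate l i).filter (fun p => p.2 != '-')).map (·.1)) (i - d)).map
          (fun q => (q.2, q.1)) := by
  induction l with
  | nil => intro i d; simp [PySem.List.enumerate_nil, pvDB]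
  | cons c cs ih =>
    intro i d
    simp only [PySem.List.enumerate_cons, pvDB, List.zip_cons_cons, List.filter_cons]
    by_cases hd : c = '-'
    · have h1 : (i + 1) - (d + 1) = i - d := by omega
      simpa [hd, h1] using ih (i + 1) (d + 1)
    · have h2 : (i + 1) - d = (i - d) + 1 := by omega
      simp [hd, PySem.List.enumerate_cons, h2, ih (i + 1) d]

-- kept positions are strictly increasing
theorem pvP_pairwise (l : List Char) (i : Int) :
    (((PySem.List.enumerate l i).filter (fun p => p.2 != '-')).map (·.1)).Pairwise (· < ·) := by
  exact ((PySem.List.pairwise_lt_enumerate l i).filter _).map _ (fun a b h => h)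

-- ===== VERDICT (by name: the statement is the Claim_ definition above) =====
theorem get_index_mapping_py_spec : Claim_equal_get_index_mapping_py := by
  intro s _
  unfold Spec_get_index_mapping_py get_index_mapping_py get_index_mapping_py_alt
  -- canonical forms
  have hA := pvFoldA_spec (PySem.List.enumerate s.toList 0) [] 0 PySem.Dict.empty PySem.Dict.empty
    (by simp [PySem.Dict.keys_empty]) (by simp [PySem.Dict.keys_empty])
    (PySem.List.pairwise_lt_enumerate s.toList 0)
  set P := ((PySem.List.enumerate s.toList 0).filter (fun p => p.2 != '-')).map (·.1) with hP
  -- B side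
  rw [pvScan_spec]
  simp only [List.nil_append]
  set Z := (((PySem.List.enumerate s.toList 0).zip (pvDB s.toList 0)).filter (fun p => p.1.2 != '-')) with hZ
  have hz : Z.map (fun p => (p.1.1, p.1.1 - p.2))
      = (PySem.List.enumerate P 0).map (fun q => (q.2, q.1)) := by
    have := pvZip_spec s.toList 0 0
    simpa using this
  have hPnodup : P.Nodup := (pvP_pairwise s.toList 0).imp (fun h => ne_of_lt h)
  have hmap : Z.map (fun p => p.1.1) = P := by
    have h := congrArg (List.map (fun x : Int × Int => x.1)) hz
    simpa [List.map_map, Function.comp_def, PySem.List.map_snd_enumerate] using h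
  -- a2c fold = fresh-key insert loop
  have ha2c : (Z.foldl (fun dct p => dct.insert p.1.1 (p.1.1 - p.2)) PySem.Dict.empty).items
      = (PySem.List.enumerate P 0).map (fun q => (q.2, q.1)) := by
    have h := PySem.Dict.items_foldl_insert_fresh Z (fun p => p.1.1) (fun p => p.1.1 - p.2)
      PySem.Dict.empty (by intro a _; simp [PySem.Dict.contains_empty]) (by rw [hmap]; exact hPnodup)
    simpa [hz] using h
  rw [ha2c]
  -- c2a fold over swapped items
  have hidxnodup : (((PySem.List.enumerate P 0).map (fun q => (q.2, q.1))).map (fun kv => kv.2)).Nodup := by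
    have h1 : ((PySem.List.enumerate P 0).map (fun q => q.1)).Pairwise (· < ·) :=
      (PySem.List.pairwise_lt_enumerate P 0).map _ (fun a b h => h)
    have h2 := h1.imp (fun h => ne_of_lt h)
    simpa [List.map_map, Function.comp_def] using h2
  have hc2a : (((PySem.List.enumerate P 0).map (fun q => (q.2, q.1))).foldl
      (fun dct kv => dct.insert kv.2 kv.1) PySem.Dict.empty).items
      = PySem.List.enumerate P 0 := by
    have h := PySem.Dict.items_foldl_insert_fresh ((PySem.List.enumerate P 0).map (fun q => (q.2, q.1)))
      (fun kv => kv.2) (fun kv => kv.1)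
      PySem.Dict.empty (by intro a _; simp [PySem.Dict.contains_empty]) hidxnodup
    simpa [List.map_map, Function.comp_def] using h
  rw [hc2a]
  simp only [Prod.mk.injEq]
  exact ⟨by rw [hA.1]; rfl, by rw [hA.2]; rfl⟩
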